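-- pv_equiv track=rewrite | github.com/amitmakhija/python | magic_number.py | solve
-- ===== SOURCE A (Python) =====
-- def solve(lst):
--     cnt = 0
--     res = 0
--     if lst[0] == 0:
--         cnt+=1
--     for i in range(1,len(lst)):
--         if lst[i] != lst[i-1]:
--             cnt = i
--         if lst[i] == cnt:
--             res += 1
--
--     return res
-- ===== SOURCE B (Python) =====
-- def solve(lst):
--     n = len(lst)
--     res = 0
--     # skip the first run of equal values (it can never match the counter)
--     i = 1
--     while i < n and lst[i] == lst[i - 1]:
--         i += 1
--     # every later run contributes its whole length iff its value equals its start index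
--     while i < n:
--         s = i
--         v = lst[i]
--         while i < n and lst[i] == v:
--             i += 1
--         if v == s:
--             res += i - s
--     return res
-- ===== Notes on version B (the rewrite author's own statement) =====
-- stated objective: alternative
-- what changed: Replaces the per-index counter-update loop by a run decomposition: skip the first run (it can never match the counter), then add each later run's full length when its value equals its start index.
-- crash fix: A raises IndexError on the empty list (it reads lst[0]); B returns 0 there. — e.g. on solve([]): A raises IndexError, B returns 0
import Mathlib
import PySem

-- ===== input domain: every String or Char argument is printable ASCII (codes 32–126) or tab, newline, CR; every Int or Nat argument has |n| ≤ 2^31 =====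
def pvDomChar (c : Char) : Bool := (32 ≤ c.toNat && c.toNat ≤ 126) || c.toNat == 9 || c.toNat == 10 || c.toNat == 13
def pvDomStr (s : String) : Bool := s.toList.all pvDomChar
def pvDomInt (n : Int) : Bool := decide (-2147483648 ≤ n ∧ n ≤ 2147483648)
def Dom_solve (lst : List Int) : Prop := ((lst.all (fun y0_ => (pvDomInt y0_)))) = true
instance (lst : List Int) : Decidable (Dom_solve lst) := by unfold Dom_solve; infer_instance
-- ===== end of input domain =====

-- B replaces A's per-index counter updates with a run decomposition (skip first run, then
-- count later runs whose value equals their start index); equal cost, different structure.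

-- ===== PORT A =====
-- the for-loop 'for i in range(1,len(lst))' as index recursion over the same state (cnt,res)
def solveLoop (lst : List Int) (i : Nat) (cnt res : Int) : Int :=
  if i < lst.length then
    if lst.getD i 0 ≠ lst.getD (i - 1) 0 then
      -- cnt = i branch
      solveLoop lst (i + 1) (i : Int) (if lst.getD i 0 = (i : Int) then res + 1 else res)
    else
      solveLoop lst (i + 1) cnt (if lst.getD i 0 = cnt then res + 1 else res)
  else res
termination_by lst.length - i

def solve (lst : List Int) : Int :=
  match lst with
  | [] => 0   -- Python raises IndexError here (lst[0]); excluded by Pre_solve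
  | x :: _ =>
    let cnt : Int := if x = 0 then 1 else 0
    solveLoop lst 1 cnt 0

-- ===== PORT B =====
-- 'while i < n and lst[i] == lst[i-1]: i += 1'
def skipEq (lst : List Int) (i : Nat) : Nat :=
  if i < lst.length ∧ lst.getD i 0 = lst.getD (i - 1) 0 then skipEq lst (i + 1) else i
termination_by lst.length - i
decreasing_by omega

-- inner 'while i < n and lst[i] == v: i += 1'
def skipRun (lst : List Int) (v : Int) (i : Nat) : Nat :=
  if i < lst.length ∧ lst.getD i 0 = v then skipRun lst v (i + 1) else i
termination_by lst.length - i
decreasing_by omega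

theorem skipRun_ge (lst : List Int) (v : Int) (i : Nat) : i ≤ skipRun lst v i := by
  fun_induction skipRun lst v i with
  | case1 i h ih => omega
  | case2 i h => omega

-- outer 'while i < n' over runs
def runsLoop (lst : List Int) (i : Nat) (res : Int) : Int :=
  if i < lst.length then
    runsLoop lst (skipRun lst (lst.getD i 0) (i + 1))
      (if lst.getD i 0 = (i : Int) then
        res + ((skipRun lst (lst.getD i 0) (i + 1) : Int) - (i : Int)) else res)
  else res
termination_by lst.length - i
decreasing_by have := skipRun_ge lst (lst.getD i 0) (i + 1); omega

def solve_alt (lst : List Int) : Int :=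
  runsLoop lst (skipEq lst 1) 0

-- ===== PRECONDITION & SPEC =====
-- A reads lst[0] unconditionally, so it raises IndexError on the empty list
def Pre_solve (lst : List Int) : Prop := lst ≠ []
instance (lst : List Int) : Decidable (Pre_solve lst) := by unfold Pre_solve; infer_instance
def pvWitness_solve : List Int := ([1, 1, 2, 3])

-- A raises IndexError on the empty list (it reads lst[0]); B returns 0 there.
def Raises_solve (lst : List Int) : Prop := lst = []
instance (lst : List Int) : Decidable (Raises_solve lst) := by unfold Raises_solve; infer_instance
def pvRaiseWitness_solve : List Int := ([])
def pvRaiseWitnessOut_solve : Int := 0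

def Spec_solve (lst : List Int) (out : Int) : Prop := out = solve_alt lst
instance (lst : List Int) (out : Int) : Decidable (Spec_solve lst out) := by unfold Spec_solve; infer_instance

-- ===== CLAIM (what is proved, stated in full; the proofs are below) =====
def Claim_equal_solve : Prop := ∀ (lst : List Int), Dom_solve lst → Pre_solve lst → Spec_solve lst (solve lst)
def Claim_raises_solve : Prop := (∀ (lst : List Int), Dom_solve lst → Raises_solve lst → ¬ Pre_solve lst) ∧ (Dom_solve (pvRaiseWitness_solve) ∧ Raises_solve (pvRaiseWitness_solve) ∧ solve_alt (pvRaiseWitness_solve) = pvRaiseWitnessOut_solve)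

-- ===== LEMMAS AND PROOFS =====

-- Inside the first run the counter never matches (cnt differs from the run's value),
-- so A's loop performs no-op steps until the first run boundary.
theorem firstRun_noop (lst : List Int) (i : Nat) (cnt res : Int)
    (h : cnt ≠ lst.getD (i - 1) 0) :
    solveLoop lst i cnt res = solveLoop lst (skipEq lst i) cnt res := by
  fun_induction skipEq lst i with
  | case1 i hc ih =>
    obtain ⟨hi, heq⟩ := hc
    rw [solveLoop, if_pos hi]
    have hcond : ¬ (lst.getD i 0 ≠ lst.getD (i - 1) 0) := fun hn => hn heq
    rw [if_neg hcond]
    have hne : ¬ lst.getD i 0 = cnt := by rw [heq]; exact fun e => h e.symm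
    rw [if_neg hne]
    exact ih (by simp only [Nat.add_sub_cancel]; exact fun e => hne e.symm)
  | case2 i hc => rfl

-- Within a later run the counter stays fixed at c; each element contributes iff v = c.
theorem run_steps (lst : List Int) (v c : Int) (i : Nat) (res : Int)
    (hprev : lst.getD (i - 1) 0 = v) :
    solveLoop lst i c res
      = solveLoop lst (skipRun lst v i) c
          (if v = c then res + ((skipRun lst v i : Int) - (i : Int)) else res) := by
  fun_induction skipRun lst v i generalizing res with
  | case1 i hc ih =>
    obtain ⟨hlt, hv⟩ := hc
    rw [solveLoop, if_pos hlt]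
    have hcond : ¬ (lst.getD i 0 ≠ lst.getD (i - 1) 0) := fun hn => hn (hv.trans hprev.symm)
    rw [if_neg hcond]
    have hge := skipRun_ge lst v (i + 1)
    rcases eq_or_ne v c with rfl | hvc
    · rw [if_pos hv, ih (res + 1) (by simp only [Nat.add_sub_cancel]; exact hv)]
      rw [if_pos rfl, if_pos rfl]
      congr 1
      push_cast; ring
    · rw [if_neg (by rw [hv]; exact hvc)]
      rw [ih res (by simp only [Nat.add_sub_cancel]; exact hv)]
      rw [if_neg hvc, if_neg hvc]
  | case2 i hc =>
    rcases eq_or_ne v c with rfl | hvc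
    · congr 1
      simp
    · simp only [if_neg hvc]

-- skipRun stops at the first index whose value differs from v (or at the end),
-- and the element just before the stop still has value v.
theorem skipRun_stop (lst : List Int) (v : Int) (i : Nat) (hprev : lst.getD (i - 1) 0 = v) :
    (skipRun lst v i < lst.length → lst.getD (skipRun lst v i) 0 ≠ v)
    ∧ lst.getD (skipRun lst v i - 1) 0 = v := by
  fun_induction skipRun lst v i with
  | case1 i hc ih =>
    exact ih (by simp only [Nat.add_sub_cancel]; exact hc.2)
  | case2 i hc =>
    exact ⟨fun hlt hv => hc ⟨hlt, hv⟩, hprev⟩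

-- Main invariant: entering A's loop at a run boundary (or the end) with any counter
-- value equals B's run loop.
theorem atRunStart (lst : List Int) (i : Nat) (cnt res : Int) (hi : 1 ≤ i)
    (hb : i < lst.length → lst.getD i 0 ≠ lst.getD (i - 1) 0) :
    solveLoop lst i cnt res = runsLoop lst i res := by
  by_cases hlt : i < lst.length
  · have hne := hb hlt
    rw [solveLoop, if_pos hlt, if_pos hne]
    have hv : lst.getD i 0 = lst.getD i 0 := rfl
    have hrs := run_steps lst (lst.getD i 0) (i : Int) (i + 1)
      (if lst.getD i 0 = (i : Int) then res + 1 else res)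
      (by simp only [Nat.add_sub_cancel])
    rw [hrs]
    have hstop := skipRun_stop lst (lst.getD i 0) (i + 1) (by simp only [Nat.add_sub_cancel])
    have hge := skipRun_ge lst (lst.getD i 0) (i + 1)
    rw [atRunStart lst (skipRun lst (lst.getD i 0) (i + 1)) (i : Int) _ (by omega)
      (fun hl => by
        intro he
        exact hstop.1 hl (he.trans hstop.2))]
    conv_rhs => rw [runsLoop]
    rw [if_pos hlt]
    congr 1
    rcases eq_or_ne (lst.getD i 0) (i : Int) with hvi | hvi
    · simp only [if_pos hvi]
      push_cast; ring
    · simp only [if_neg hvi]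
  · rw [solveLoop, if_neg hlt, runsLoop, if_neg hlt]
termination_by lst.length - i
decreasing_by omega

-- skipEq never moves left, and stops at a run boundary or at the end.
theorem skipEq_ge (lst : List Int) (i : Nat) : i ≤ skipEq lst i := by
  fun_induction skipEq lst i with
  | case1 i h ih => omega
  | case2 i h => omega

theorem skipEq_stop (lst : List Int) (i : Nat) :
    skipEq lst i < lst.length → lst.getD (skipEq lst i) 0 ≠ lst.getD (skipEq lst i - 1) 0 := by
  fun_induction skipEq lst i with
  | case1 i h ih => exact ih
  | case2 i h => intro hlt hv; exact h ⟨hlt, hv⟩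

-- ===== VERDICT (by name: the statement is the Claim_ definition above) =====
theorem solve_spec : Claim_equal_solve := by
  intro lst _ hpre
  unfold Spec_solve solve_alt
  match lst, hpre with
  | x :: rest, _ =>
    show solve (x :: rest) = _
    rw [solve]
    rw [firstRun_noop (x :: rest) 1 _ 0 (by
      simp only [Nat.sub_self, List.getD]
      split_ifs with hx
      · simp [hx]
      · simpa using fun e => hx e.symm)]
    exact atRunStart (x :: rest) (skipEq (x :: rest) 1) _ 0
      (skipEq_ge (x :: rest) 1) (skipEq_stop (x :: rest) 1)

theorem solve_raises : Claim_raises_solve := by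
  unfold Claim_raises_solve
  refine ⟨fun lst _ hr hp => hp hr, by decide, by decide, ?_⟩
  show solve_alt [] = 0
  rw [solve_alt]
  have h1 : skipEq ([] : List Int) 1 = 1 := by rw [skipEq]; simp
  rw [h1, runsLoop]
  simp

-- self-check: B's port returns 0 on the empty list, the input where A raises IndexError
theorem solve_alt_nil_ok : solve_alt [] = 0 := by
  have h := solve_raises
  unfold Claim_raises_solve at h
  exact h.2.2.2
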